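-- pv_equiv track=rewrite | github.com/amyoffe-cisco/streamlit-test | visualization/app.py | sort_tactics
-- ===== SOURCE A (Python) =====
-- from typing import Any, Dict, List, Union
--
-- def sort_tactics(tactics_to_sort: Union[List[str], set]) -> List[str]:
--     """
--     Filter and sort tactics based on canonical MITRE ATT&CK Enterprise order.
--
--     Args:
--         tactics_to_sort: Tactic names to sort
--
--     Returns:
--         List of tactics sorted by canonical order, containing only tactics
--         that are present in the input
--     """
--     # Canonical MITRE ATT&CK Enterprise tactic order.
--     # Reference: https://attack.mitre.org/tactics/enterprise/
--     CANONICAL_TACTIC_ORDER = [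
--         "Reconnaissance",
--         "Resource Development",
--         "Initial Access",
--         "Execution",
--         "Persistence",
--         "Privilege Escalation",
--         "Defense Evasion",
--         "Credential Access",
--         "Discovery",
--         "Lateral Movement",
--         "Collection",
--         "Command and Control",
--         "Exfiltration",
--         "Impact",
--     ]
--
--     return [tactic for tactic in CANONICAL_TACTIC_ORDER if tactic in tactics_to_sort]
-- ===== SOURCE B (Python) =====
-- def sort_tactics(tactics_to_sort):
--     """Deduplicate the input, keep only canonical tactics, and sort them by
--     canonical MITRE ATT&CK position."""
--     CANONICAL_TACTIC_ORDER = [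
--         "Reconnaissance",
--         "Resource Development",
--         "Initial Access",
--         "Execution",
--         "Persistence",
--         "Privilege Escalation",
--         "Defense Evasion",
--         "Credential Access",
--         "Discovery",
--         "Lateral Movement",
--         "Collection",
--         "Command and Control",
--         "Exfiltration",
--         "Impact",
--     ]
--     present = set(t for t in tactics_to_sort if t in CANONICAL_TACTIC_ORDER)
--     return sorted(present, key=CANONICAL_TACTIC_ORDER.index)
-- ===== Notes on version B (the rewrite author's own statement) =====
-- stated objective: alternative
-- what changed: B iterates over the input (deduplicated via a set, filtered to canonical names) and sorts the survivors by their canonical index, instead of A's scan over the canonical list with a membership test against the input.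
import Mathlib
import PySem

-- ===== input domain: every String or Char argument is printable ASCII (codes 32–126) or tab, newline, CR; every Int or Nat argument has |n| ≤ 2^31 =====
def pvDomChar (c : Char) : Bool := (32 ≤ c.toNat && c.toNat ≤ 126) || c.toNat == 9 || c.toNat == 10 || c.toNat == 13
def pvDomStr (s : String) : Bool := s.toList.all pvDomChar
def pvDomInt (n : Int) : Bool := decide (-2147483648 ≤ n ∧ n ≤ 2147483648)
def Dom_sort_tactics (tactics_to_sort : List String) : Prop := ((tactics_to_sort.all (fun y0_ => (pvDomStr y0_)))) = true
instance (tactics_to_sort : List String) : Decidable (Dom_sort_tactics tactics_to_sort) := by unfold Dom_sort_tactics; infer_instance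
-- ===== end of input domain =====

-- B deduplicates the input, filters to canonical names and sorts by canonical index,
-- instead of A's scan over the canonical list with a membership test against the input (alternative decomposition).


-- shared constant: the literal CANONICAL_TACTIC_ORDER both Pythons define
def CANONICAL_TACTIC_ORDER : List String :=
  ["Reconnaissance", "Resource Development", "Initial Access", "Execution",
   "Persistence", "Privilege Escalation", "Defense Evasion", "Credential Access",
   "Discovery", "Lateral Movement", "Collection", "Command and Control",
   "Exfiltration", "Impact"]

-- ===== PORT A =====
-- [tactic for tactic in CANONICAL_TACTIC_ORDER if tactic in tactics_to_sort]
def sort_tactics (tactics_to_sort : List String) : List String :=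
  CANONICAL_TACTIC_ORDER.filter (fun tactic => tactics_to_sort.contains tactic)

-- ===== PORT B =====
-- present = set(t for t in tactics_to_sort if t in CANONICAL_TACTIC_ORDER)
-- return sorted(present, key=CANONICAL_TACTIC_ORDER.index)
-- (.index never raises here since every element of present is canonical; the
--  port's .getD 0 default is therefore never used)
def sort_tactics_alt (tactics_to_sort : List String) : List String :=
  let present := PySem.Set.ofList (tactics_to_sort.filter (fun t => CANONICAL_TACTIC_ORDER.contains t))
  PySem.List.sorted present (fun t => (((PySem.List.index? CANONICAL_TACTIC_ORDER t).getD 0 : Nat) : Int)) false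

-- ===== PRECONDITION & SPEC =====
def Spec_sort_tactics (tactics_to_sort : List String) (out : List String) : Prop := out = sort_tactics_alt tactics_to_sort
instance (tactics_to_sort : List String) (out : List String) : Decidable (Spec_sort_tactics tactics_to_sort out) := by unfold Spec_sort_tactics; infer_instance

-- ===== CLAIM (what is proved, stated in full; the proofs are below) =====
def Claim_equal_sort_tactics : Prop := ∀ (tactics_to_sort : List String), Dom_sort_tactics tactics_to_sort → Spec_sort_tactics tactics_to_sort (sort_tactics tactics_to_sort)

-- ===== LEMMAS AND PROOFS =====

-- A's output is strictly increasing under B's sort key (a sublist of the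
-- canonical list, which is strictly increasing by canonical index).
lemma filter_pairwise_key (xs : List String) :
    (CANONICAL_TACTIC_ORDER.filter (fun tactic => xs.contains tactic)).Pairwise
      (fun a b => (((PySem.List.index? CANONICAL_TACTIC_ORDER a).getD 0 : Nat) : Int)
                < (((PySem.List.index? CANONICAL_TACTIC_ORDER b).getD 0 : Nat) : Int)) := by
  have h : CANONICAL_TACTIC_ORDER.Pairwise
      (fun a b => (((PySem.List.index? CANONICAL_TACTIC_ORDER a).getD 0 : Nat) : Int)
                < (((PySem.List.index? CANONICAL_TACTIC_ORDER b).getD 0 : Nat) : Int)) := by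
    decide
  exact h.sublist List.filter_sublist

-- A's output is a permutation of B's deduplicated, filtered input.
lemma filter_perm_present (xs : List String) :
    (CANONICAL_TACTIC_ORDER.filter (fun tactic => xs.contains tactic)).Perm
      (PySem.Set.ofList (xs.filter (fun t => CANONICAL_TACTIC_ORDER.contains t))) := by
  have h1 : (CANONICAL_TACTIC_ORDER.filter (fun tactic => xs.contains tactic)).Nodup :=
    List.Nodup.filter _ (by decide)
  have h2 := PySem.Set.nodup_ofList (xs.filter (fun t => CANONICAL_TACTIC_ORDER.contains t))
  rw [List.perm_ext_iff_of_nodup h1 h2]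
  intro a
  simp [PySem.Set.mem_ofList, List.mem_filter, and_comm]

theorem sort_tactics_eq (xs : List String) : sort_tactics xs = sort_tactics_alt xs := by
  unfold sort_tactics sort_tactics_alt
  exact (PySem.List.sorted_eq_of_perm_of_pairwise_lt _ _
    (fun t => (((PySem.List.index? CANONICAL_TACTIC_ORDER t).getD 0 : Nat) : Int))
    (filter_perm_present xs) (filter_pairwise_key xs)).symm

-- ===== VERDICT (by name: the statement is the Claim_ definition above) =====
theorem sort_tactics_spec : Claim_equal_sort_tactics := by
  intro xs _
  exact sort_tactics_eq xs
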